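-- pv_equiv track=rewrite | github.com/Kennyodb/advent_of_code | 2024/5/main.py | get_valid_insertions
-- ===== SOURCE A (Python) =====
-- import re, sys, os, copy, itertools
--
-- def get_valid_insertions(list, e, rules):
--     valid = []
--     for i in range(len(list) + 1):
--         option = copy.deepcopy(list)
--         option.insert(i, e)
--         if correct_order(option, rules):
--             valid.append(option)
--     return valid
--
-- def correct_order(list, rules):
--     for rule in rules:
--         if not is_applied(list, rule):
--             return False
--     return True
--
-- def is_applied(list, rule):
--     return rule[0] not in list or rule[1] not in list \
--         or list.index(rule[0]) < list.index(rule[1])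
-- ===== SOURCE B (Python) =====
-- def get_valid_insertions(list, e, rules):
--     # Compute the valid insertion interval [lo, hi] instead of testing each position.
--     idx = {}
--     for j, x in enumerate(list):
--         if x not in idx:
--             idx[x] = j
--     k = idx.get(e)
--     lo, hi = 0, len(list)
--     for a, b in rules:
--         if a == e and b == e:
--             return []
--         elif a == e:
--             j = idx.get(b)
--             if j is None or (k is not None and k < j):
--                 continue
--             hi = min(hi, j)
--         elif b == e:
--             j = idx.get(a)
--             if j is None:
--                 continue
--             if k is not None and j >= k:
--                 return []
--             lo = max(lo, j + 1)
--         else: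
--             ja = idx.get(a)
--             jb = idx.get(b)
--             if ja is not None and jb is not None and ja >= jb:
--                 return []
--     return [list[:i] + [e] + list[i:] for i in range(lo, hi + 1)]
-- ===== Notes on version B (the rewrite author's own statement) =====
-- stated objective: faster
-- what changed: Instead of inserting e at every position and re-checking every rule with repeated list.index scans, B builds a first-occurrence index map once, checks rules not involving e directly on it, folds rules involving e into a single valid insertion interval [lo, hi], and emits exactly the insertions in that interval.
import Mathlib
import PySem

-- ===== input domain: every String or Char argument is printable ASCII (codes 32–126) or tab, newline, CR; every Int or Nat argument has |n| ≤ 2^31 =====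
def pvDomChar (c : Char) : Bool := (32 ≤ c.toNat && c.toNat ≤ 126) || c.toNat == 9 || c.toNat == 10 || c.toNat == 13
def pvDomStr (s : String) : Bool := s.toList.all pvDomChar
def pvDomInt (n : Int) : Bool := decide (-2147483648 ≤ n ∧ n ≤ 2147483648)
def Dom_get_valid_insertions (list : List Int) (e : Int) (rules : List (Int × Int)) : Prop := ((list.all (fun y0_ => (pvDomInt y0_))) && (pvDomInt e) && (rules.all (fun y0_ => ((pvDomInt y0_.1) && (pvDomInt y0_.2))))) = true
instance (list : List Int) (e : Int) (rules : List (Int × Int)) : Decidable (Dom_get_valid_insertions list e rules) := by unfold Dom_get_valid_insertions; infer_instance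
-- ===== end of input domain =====

-- B replaces A's try-every-position-and-recheck-all-rules search by a single pass that
-- computes the valid insertion interval [lo, hi] from a first-occurrence index map.

-- ===== PORT A =====
def is_applied (list : List Int) (rule : Int × Int) : Bool :=
  !list.contains rule.1 || !list.contains rule.2 ||
    decide ((PySem.List.index? list rule.1).getD 0 < (PySem.List.index? list rule.2).getD 0)

def correct_order (list : List Int) (rules : List (Int × Int)) : Bool :=
  rules.all (fun rule => is_applied list rule)

def get_valid_insertions (list : List Int) (e : Int) (rules : List (Int × Int)) : List (List Int) :=
  (PySem.List.pyRange 0 ((list.length : Int) + 1) 1).foldl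
    (fun valid i =>
      let option := PySem.List.insert list i e
      if correct_order option rules then valid ++ [option] else valid) []

-- ===== PORT B =====
-- the rule scan of Source B: running interval [lo, hi]; none = an early 'return []'
def scanRules (e : Int) (idx : PySem.Dict Int Int) (k : Option Int) :
    List (Int × Int) → Int → Int → Option (Int × Int)
  | [], lo, hi => some (lo, hi)
  | (a, b) :: rest, lo, hi =>
    if a = e ∧ b = e then none
    else if a = e then
      match idx.get? b with
      | none => scanRules e idx k rest lo hi
      | some j =>
        match k with
        | some kk => if kk < j then scanRules e idx k rest lo hi
                     else scanRules e idx k rest lo (min hi j)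
        | none => scanRules e idx k rest lo (min hi j)
    else if b = e then
      match idx.get? a with
      | none => scanRules e idx k rest lo hi
      | some j =>
        match k with
        | some kk => if kk ≤ j then none else scanRules e idx k rest (max lo (j + 1)) hi
        | none => scanRules e idx k rest (max lo (j + 1)) hi
    else
      match idx.get? a, idx.get? b with
      | some ja, some jb => if ja ≥ jb then none else scanRules e idx k rest lo hi
      | _, _ => scanRules e idx k rest lo hi

def get_valid_insertions_alt (list : List Int) (e : Int) (rules : List (Int × Int)) : List (List Int) :=
  let idx := (PySem.List.enumerate list 0).foldl
    (fun d p => if d.contains p.2 then d else d.insert p.2 p.1) PySem.Dict.empty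
  let k := idx.get? e
  match scanRules e idx k rules 0 (list.length : Int) with
  | none => []
  | some (lo, hi) =>
    (PySem.List.pyRange lo (hi + 1) 1).map (fun i =>
      PySem.List.slice list none (some i) ++ [e] ++ PySem.List.slice list (some i) none)

-- ===== PRECONDITION & SPEC =====
def Spec_get_valid_insertions (list : List Int) (e : Int) (rules : List (Int × Int)) (out : List (List Int)) : Prop := out = get_valid_insertions_alt list e rules
instance (list : List Int) (e : Int) (rules : List (Int × Int)) (out : List (List Int)) : Decidable (Spec_get_valid_insertions list e rules out) := by unfold Spec_get_valid_insertions; infer_instance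

-- ===== CLAIM (what is proved, stated in full; the proofs are below) =====
def Claim_equal_get_valid_insertions : Prop := ∀ (list : List Int) (e : Int) (rules : List (Int × Int)), Dom_get_valid_insertions list e rules → Spec_get_valid_insertions list e rules (get_valid_insertions list e rules)

-- ===== LEMMAS AND PROOFS =====

lemma index?_insert (l : List Int) (e x : Int) (i : Nat) (hi : i ≤ l.length) :
    PySem.List.index? (l.take i ++ e :: l.drop i) x =
      match PySem.List.index? l x with
      | some j => if j < i then some j else if x = e then some i else some (j + 1)
      | none => if x = e then some i else none := by
  induction i generalizing l with
  | zero =>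
    simp only [List.take_zero, List.drop_zero, List.nil_append]
    by_cases hxe : x = e
    · subst hxe
      rw [PySem.List.index?_cons_self]
      cases h : PySem.List.index? l x <;> simp
    · rw [PySem.List.index?_cons_of_ne _ (Ne.symm hxe)]
      cases h : PySem.List.index? l x <;> simp [hxe]
  | succ i ih =>
    cases l with
    | nil => simp at hi
    | cons y t =>
      simp only [List.take_succ_cons, List.drop_succ_cons, List.cons_append]
      by_cases hyx : y = x
      · subst hyx
        rw [PySem.List.index?_cons_self, PySem.List.index?_cons_self]
        simp
      · rw [PySem.List.index?_cons_of_ne _ hyx, PySem.List.index?_cons_of_ne _ hyx,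
            ih t (by simpa using hi)]
        cases h : PySem.List.index? t x
        · by_cases hxe : x = e <;> simp [hxe]
        · rename_i j
          simp only [Option.map_some]
          by_cases hji : j < i
          · simp [hji]
          · by_cases hxe : x = e <;> simp [hji, hxe]

lemma contains_eq_isSome_index? (xs : List Int) (v : Int) :
    xs.contains v = (PySem.List.index? xs v).isSome := by
  rw [Bool.eq_iff_iff]
  simp

lemma index?_inj (l : List Int) {x y : Int} {k : Nat}
    (hx : PySem.List.index? l x = some k) (hy : PySem.List.index? l y = some k) : x = y := by
  obtain ⟨hk, hxk, -⟩ := PySem.List.getElem_of_index?_eq_some hx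
  obtain ⟨hk2, hyk, -⟩ := PySem.List.getElem_of_index?_eq_some hy
  exact hxk.symm.trans hyk

def ruleOK (l : List Int) (e a b : Int) (i : Nat) : Bool :=
  if a = e ∧ b = e then false
  else if a = e then
    match PySem.List.index? l b with
    | none => true
    | some j =>
      match PySem.List.index? l e with
      | some k => if k < j then true else decide (i ≤ j)
      | none => decide (i ≤ j)
  else if b = e then
    match PySem.List.index? l a with
    | none => true
    | some j =>
      match PySem.List.index? l e with
      | some k => if k ≤ j then false else decide (j < i)
      | none => decide (j < i)
  else
    match PySem.List.index? l a, PySem.List.index? l b with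
    | some ja, some jb => decide (ja < jb)
    | _, _ => true

set_option maxHeartbeats 1000000 in
lemma is_applied_insert (l : List Int) (e a b : Int) (i : Nat) (hi : i ≤ l.length) :
    is_applied (l.take i ++ e :: l.drop i) (a, b) = ruleOK l e a b i := by
  unfold is_applied ruleOK
  rw [contains_eq_isSome_index?, contains_eq_isSome_index?,
      index?_insert l e a i hi, index?_insert l e b i hi]
  by_cases hae : a = e
  · rw [hae]
    by_cases hbe : b = e
    · rw [hbe]
      cases he : PySem.List.index? l e <;> (try simp_all) <;> (try split_ifs) <;> (try simp_all) <;> (try omega) <;> (try (rw [Bool.eq_iff_iff]; simp; try omega))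
    · simp only [hbe, and_false, if_false]
      cases he : PySem.List.index? l e with
      | none =>
        cases hb : PySem.List.index? l b with
        | none => simp
        | some j => (try simp_all) <;> (try split_ifs) <;> (try simp_all) <;> (try omega) <;> (try (rw [Bool.eq_iff_iff]; simp; try omega))
      | some k =>
        cases hb : PySem.List.index? l b with
        | none => simp
        | some j =>
          have hkj : k ≠ j := fun h => hbe ((index?_inj l (h ▸ he) hb).symm)
          (try simp_all) <;> (try split_ifs) <;> (try simp_all) <;> (try omega) <;> (try (rw [Bool.eq_iff_iff]; simp; try omega))
  · by_cases hbe : b = e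
    · rw [hbe]
      simp only [hae, false_and, if_false]
      cases he : PySem.List.index? l e with
      | none =>
        cases ha : PySem.List.index? l a with
        | none => simp
        | some j => (try simp_all) <;> (try split_ifs) <;> (try simp_all) <;> (try omega) <;> (try (rw [Bool.eq_iff_iff]; simp; try omega))
      | some k =>
        cases ha : PySem.List.index? l a with
        | none => simp
        | some j =>
          have hkj : k ≠ j := fun h => hae ((index?_inj l (h ▸ he) ha).symm)
          (try simp_all) <;> (try split_ifs) <;> (try simp_all) <;> (try omega) <;> (try (rw [Bool.eq_iff_iff]; simp; try omega))
    · simp only [hae, hbe, false_and, if_false]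
      cases ha : PySem.List.index? l a <;> cases hb : PySem.List.index? l b <;>
        (try simp_all) <;> (try split_ifs) <;> (try simp_all) <;> (try omega) <;> (try (rw [Bool.eq_iff_iff]; simp; try omega))

lemma foldl_idx (l : List Int) (s : Int) (d : PySem.Dict Int Int) (x : Int) :
    ((PySem.List.enumerate l s).foldl
      (fun d p => if d.contains p.2 then d else d.insert p.2 p.1) d).get? x
    = match d.get? x with
      | some v => some v
      | none => (PySem.List.index? l x).map (fun n => s + (n : Int)) := by
  induction l generalizing s d with
  | nil =>
    simp only [PySem.List.enumerate_nil, List.foldl_nil]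
    cases h : d.get? x <;> simp [PySem.List.index?_eq_idxOf?]
  | cons y t ih =>
    rw [PySem.List.enumerate_cons, List.foldl_cons]
    by_cases hc : d.contains y = true
    · simp only [hc, if_true, ih]
      have hxy : x ≠ y ∨ (d.get? x).isSome := by
        by_cases hxy : x = y
        · right; subst hxy; rw [← PySem.Dict.contains_eq_isSome_get?]; exact hc
        · left; exact hxy
      cases h : d.get? x with
      | some v => simp
      | none =>
        have hxy' : x ≠ y := by
          rcases hxy with h' | h'
          · exact h'
          · rw [h] at h'; simp at h'
        rw [PySem.List.index?_cons_of_ne _ (Ne.symm hxy')]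
        cases ht : PySem.List.index? t x <;> simp; ring
    · rw [Bool.not_eq_true] at hc
      simp only [hc, Bool.false_eq_true, if_false, ih]
      rw [PySem.Dict.get?_insert]
      by_cases hxy : x = y
      · subst hxy
        have hd : d.get? x = none := by
          rw [← Option.not_isSome_iff_eq_none, ← PySem.Dict.contains_eq_isSome_get?]
          simp [hc]
        rw [PySem.List.index?_cons_self]
        simp [hd]
      · simp only [if_neg hxy]
        cases h : d.get? x with
        | some v => simp
        | none =>
          rw [PySem.List.index?_cons_of_ne _ (Ne.symm hxy)]
          cases ht : PySem.List.index? t x <;> simp; ring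

lemma buildIdx_get? (l : List Int) (x : Int) :
    ((PySem.List.enumerate l 0).foldl
      (fun d p => if d.contains p.2 then d else d.insert p.2 p.1) PySem.Dict.empty).get? x
      = (PySem.List.index? l x).map (fun n => (n : Int)) := by
  rw [foldl_idx]
  cases h : (PySem.Dict.empty : PySem.Dict Int Int).get? x with
  | some v => simp [PySem.Dict.get?_empty] at h
  | none => cases ht : PySem.List.index? l x <;> simp

lemma scanRules_correct (l : List Int) (e : Int) (idx : PySem.Dict Int Int)
    (hidx : ∀ x, idx.get? x = (PySem.List.index? l x).map (fun n => (n : Int)))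
    (rules : List (Int × Int)) (lo hi : Int) (i : Nat) (hil : i ≤ l.length) :
    ((decide (lo ≤ (i : Int) ∧ (i : Int) ≤ hi)) &&
      (rules.all (fun r => is_applied (l.take i ++ e :: l.drop i) r))) =
    (match scanRules e idx (idx.get? e) rules lo hi with
     | none => false
     | some (lo', hi') => decide (lo' ≤ (i : Int) ∧ (i : Int) ≤ hi')) := by
  induction rules generalizing lo hi with
  | nil => simp [scanRules]
  | cons r rest ih =>
    obtain ⟨a, b⟩ := r
    rw [List.all_cons, is_applied_insert l e a b i hil]
    simp only [scanRules]
    unfold ruleOK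
    by_cases hab : a = e ∧ b = e
    · simp [if_pos hab]
    · rw [if_neg hab, if_neg hab]
      by_cases hae : a = e
      · have hbe : ¬ b = e := fun h => hab ⟨hae, h⟩
        rw [if_pos hae, if_pos hae]
        cases hb : PySem.List.index? l b with
        | none =>
          have hgb : idx.get? b = none := by rw [hidx b, hb]; rfl
          simp only [hgb]
          simpa using ih lo hi
        | some j =>
          have hgb : idx.get? b = some ((j : Nat) : Int) := by rw [hidx b, hb]; rfl
          simp only [hgb]
          cases he : PySem.List.index? l e with
          | none =>
            have hge : idx.get? e = none := by rw [hidx e, he]; rfl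
            simp only [hge]
            have ih' := ih lo (min hi (j : Int)); rw [hge] at ih'
            rw [← ih', ← Bool.and_assoc]
            congr 1
            rw [Bool.eq_iff_iff]; simp; omega
          | some k =>
            have hge : idx.get? e = some ((k : Nat) : Int) := by rw [hidx e, he]; rfl
            simp only [hge]
            by_cases hkj : k < j
            · rw [if_pos (by exact_mod_cast hkj : (k:Int) < (j:Int))]
              have ih' := ih lo hi; rw [hge] at ih'
              simpa [if_pos hkj] using ih'
            · rw [if_neg (by exact_mod_cast hkj : ¬ (k:Int) < (j:Int)), if_neg hkj]
              have ih' := ih lo (min hi (j : Int)); rw [hge] at ih'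
              rw [← ih', ← Bool.and_assoc]
              congr 1
              rw [Bool.eq_iff_iff]; simp; omega
      · rw [if_neg hae, if_neg hae]
        by_cases hbe : b = e
        · rw [if_pos hbe, if_pos hbe]
          cases ha : PySem.List.index? l a with
          | none =>
            have hga : idx.get? a = none := by rw [hidx a, ha]; rfl
            simp only [hga]
            simpa using ih lo hi
          | some j =>
            have hga : idx.get? a = some ((j : Nat) : Int) := by rw [hidx a, ha]; rfl
            simp only [hga]
            cases he : PySem.List.index? l e with
            | none =>
              have hge : idx.get? e = none := by rw [hidx e, he]; rfl
              simp only [hge]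
              have ih' := ih (max lo ((j : Int) + 1)) hi; rw [hge] at ih'
              rw [← ih', ← Bool.and_assoc]
              congr 1
              rw [Bool.eq_iff_iff]; simp; omega
            | some k =>
              have hge : idx.get? e = some ((k : Nat) : Int) := by rw [hidx e, he]; rfl
              simp only [hge]
              by_cases hkj : k ≤ j
              · rw [if_pos (by exact_mod_cast hkj : (k:Int) ≤ (j:Int)), if_pos hkj]
                simp
              · rw [if_neg (by exact_mod_cast hkj : ¬ (k:Int) ≤ (j:Int)), if_neg hkj]
                have ih' := ih (max lo ((j : Int) + 1)) hi; rw [hge] at ih'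
                rw [← ih', ← Bool.and_assoc]
                congr 1
                rw [Bool.eq_iff_iff]; simp; omega
        · rw [if_neg hbe, if_neg hbe]
          cases ha : PySem.List.index? l a with
          | none =>
            have hga : idx.get? a = none := by rw [hidx a, ha]; rfl
            simp only [hga]
            simpa using ih lo hi
          | some ja =>
            have hga : idx.get? a = some ((ja : Nat) : Int) := by rw [hidx a, ha]; rfl
            simp only [hga]
            cases hb : PySem.List.index? l b with
            | none =>
              have hgb : idx.get? b = none := by rw [hidx b, hb]; rfl
              simp only [hgb]
              simpa using ih lo hi
            | some jb =>
              have hgb : idx.get? b = some ((jb : Nat) : Int) := by rw [hidx b, hb]; rfl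
              simp only [hgb]
              by_cases hj : ja ≥ jb
              · rw [if_pos (by exact_mod_cast hj : (ja:Int) ≥ (jb:Int))]
                simp [show ¬ ja < jb by omega]
              · rw [if_neg (by exact_mod_cast hj : ¬ (ja:Int) ≥ (jb:Int))]
                rw [show (decide (ja < jb)) = true by simp; omega]
                simpa using ih lo hi

lemma scanRules_mono (e : Int) (idx : PySem.Dict Int Int) (k : Option Int)
    (rules : List (Int × Int)) : ∀ (lo hi lo' hi' : Int),
    scanRules e idx k rules lo hi = some (lo', hi') → lo ≤ lo' ∧ hi' ≤ hi := by
  induction rules with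
  | nil =>
    intro lo hi lo' hi' h
    simp [scanRules] at h
    omega
  | cons r rest ih =>
    obtain ⟨a, b⟩ := r
    intro lo hi lo' hi' h
    unfold scanRules at h
    repeat' split at h
    all_goals first
      | (cases h)
      | omega
      | (rcases ih _ _ _ _ h with ⟨h1, h2⟩; constructor <;> omega)

lemma filter_interval (a b lo hi : Int) :
    (PySem.List.pyRange a b 1).filter (fun i => decide (lo ≤ i ∧ i ≤ hi)) =
      PySem.List.pyRange (max a lo) (min b (hi + 1)) 1 := by
  induction h : (b - a).toNat generalizing a with
  | zero =>
    rw [PySem.List.pyRange_one_eq_nil (by omega), PySem.List.pyRange_one_eq_nil (by omega)]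
    rfl
  | succ n ihn =>
    rw [PySem.List.pyRange_one_cons (by omega), List.filter_cons]
    by_cases hcond : lo ≤ a ∧ a ≤ hi
    · rw [if_pos (by simpa using hcond), ihn (a + 1) (by omega),
          show max (a + 1) lo = a + 1 by omega, show max a lo = a by omega]
      exact (PySem.List.pyRange_one_cons (show a < min b (hi + 1) by omega)).symm
    · rw [if_neg (by simpa using hcond), ihn (a + 1) (by omega)]
      by_cases hlo : a < lo
      · rw [show max (a + 1) lo = max a lo by omega]
      · rw [PySem.List.pyRange_one_eq_nil (by omega), PySem.List.pyRange_one_eq_nil (by omega)]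

-- ===== VERDICT (by name: the statement is the Claim_ definition above) =====
theorem get_valid_insertions_spec : Claim_equal_get_valid_insertions := by
  unfold Claim_equal_get_valid_insertions Spec_get_valid_insertions
  intro l e rules _
  unfold get_valid_insertions get_valid_insertions_alt
  generalize hidx0 : (PySem.List.enumerate l 0).foldl
      (fun d p => if d.contains p.2 then d else d.insert p.2 p.1) PySem.Dict.empty = idx
  have hidx : ∀ x, idx.get? x = (PySem.List.index? l x).map (fun n => (n : Int)) :=
    fun x => hidx0 ▸ buildIdx_get? l x
  show (PySem.List.pyRange 0 ((l.length : Int) + 1) 1).foldl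
      (fun valid i => if correct_order (PySem.List.insert l i e) rules then
        valid ++ [PySem.List.insert l i e] else valid) [] =
    (match scanRules e idx (idx.get? e) rules 0 (l.length : Int) with
     | none => []
     | some (lo, hi) =>
       (PySem.List.pyRange lo (hi + 1) 1).map (fun i =>
         PySem.List.slice l none (some i) ++ [e] ++ PySem.List.slice l (some i) none))
  rw [PySem.List.foldl_append_if (p := fun i => correct_order (PySem.List.insert l i e) rules)
      (f := fun i => PySem.List.insert l i e), List.nil_append]
  have hp : ∀ i ∈ PySem.List.pyRange 0 ((l.length : Int) + 1) 1,
      correct_order (PySem.List.insert l i e) rules =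
      (match scanRules e idx (idx.get? e) rules 0 (l.length : Int) with
       | none => false
       | some (lo', hi') => decide (lo' ≤ i ∧ i ≤ hi')) := by
    intro i hi
    rw [PySem.List.mem_pyRange_one] at hi
    have hmn : i.toNat ≤ l.length := by omega
    rw [show i = ((i.toNat : Nat) : Int) from by omega, PySem.List.insert_natCast l i.toNat e hmn]
    have := scanRules_correct l e idx hidx rules 0 (l.length : Int) i.toNat hmn
    rw [show (decide (0 ≤ ((i.toNat : Nat) : Int) ∧ ((i.toNat : Nat) : Int) ≤ (l.length : Int))) = true
          from by simp only [decide_eq_true_eq]; omega, Bool.true_and] at this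
    exact this
  cases hscan : scanRules e idx (idx.get? e) rules 0 ((l.length : Int)) with
  | none =>
    have hnil : (PySem.List.pyRange 0 ((l.length : Int) + 1) 1).filter
        (fun i => correct_order (PySem.List.insert l i e) rules) = [] := by
      apply List.filter_eq_nil_iff.mpr
      intro i hi
      have h := hp i hi
      rw [hscan] at h
      simp [h]
    rw [hnil]
    rfl
  | some lohi =>
    obtain ⟨lo, hi⟩ := lohi
    obtain ⟨hlo, hhi⟩ := scanRules_mono e idx (idx.get? e) rules 0 (l.length : Int) lo hi hscan
    show _ = (PySem.List.pyRange lo (hi + 1) 1).map (fun i =>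
      PySem.List.slice l none (some i) ++ [e] ++ PySem.List.slice l (some i) none)
    rw [List.filter_congr (fun i hi => by rw [hp i hi, hscan]), filter_interval,
        show max 0 lo = lo from by omega,
        show min ((l.length : Int) + 1) (hi + 1) = hi + 1 from by omega]
    apply List.map_congr_left
    intro i him
    rw [PySem.List.mem_pyRange_one] at him
    rw [PySem.List.slice_to l (by omega), PySem.List.slice_from l (by omega),
        show i = ((i.toNat : Nat) : Int) from by omega,
        PySem.List.insert_natCast l i.toNat e (by omega)]
    simp [show max i 0 = i from by omega]
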